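-- pv_equiv track=rewrite | github.com/highly-illogical/project-euler | python/p174.py | laminae
-- ===== SOURCE A (Python) =====
-- def laminae(n):
--     tiles = [0 for i in range(n)]
--     side = 3
--     t = 0
--     while (side**2 - (side-2)**2) <= n:
--         hole = side-2
--         while hole > 0:
--             ntiles = side**2 - hole**2
--             if ntiles <= n:
--                 t += 1
--                 hole -= 2
--                 tiles[ntiles-1] += 1
--             else:
--                 break
--         side += 1
--     return tiles
-- ===== SOURCE B (Python) =====
-- def laminae(n):
--     # A lamina with v tiles is exactly a factorization v = p*q with p < q and both
--     # factors even (side=(p+q)//2, hole=(q-p)//2 > 0), so enumerate even factor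
--     # pairs directly, bounded by the product.
--     tiles = [0] * n
--     p = 2
--     while p * (p + 2) <= n:
--         q = p + 2
--         while p * q <= n:
--             tiles[p * q - 1] += 1
--             q += 2
--         p += 2
--     return tiles
-- ===== Notes on version B (the rewrite author's own statement) =====
-- stated objective: alternative
-- what changed: B replaces A's geometric sweep (outer side, inner shrinking hole with a break on ntiles > n) by a direct enumeration of even factor pairs p*q <= n with p < q (difference of squares: side=(p+q)/2, hole=(q-p)/2), incrementing the histogram at each product.
import Mathlib
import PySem

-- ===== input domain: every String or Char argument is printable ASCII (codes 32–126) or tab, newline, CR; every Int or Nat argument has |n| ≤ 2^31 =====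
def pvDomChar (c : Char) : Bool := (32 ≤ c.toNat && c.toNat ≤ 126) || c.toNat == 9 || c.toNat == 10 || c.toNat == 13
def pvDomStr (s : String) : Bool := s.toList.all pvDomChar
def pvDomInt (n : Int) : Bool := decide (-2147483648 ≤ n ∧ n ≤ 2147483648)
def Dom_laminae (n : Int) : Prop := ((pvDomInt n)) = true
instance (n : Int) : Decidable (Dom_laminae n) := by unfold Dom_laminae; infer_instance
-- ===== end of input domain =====

-- B counts each lamina with v tiles as a factorization v = p*q with p < q and both factors even
-- (difference of squares), instead of A's nested side/hole sweep over a shared histogram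
-- (objective: alternative; same return value, proved equal for every n).

-- ===== PORT A =====
-- inner `while hole > 0: ... else: break` of A; returns the updated (t, tiles).
-- fuel is a structural bound on the iteration count (hole shrinks by 2 each pass);
-- it only makes the loop total and never changes the computed value.
def laminaeInner (fuel : Nat) (n side t hole : Int) (tiles : List Int) : Int × List Int :=
  match fuel with
  | 0 => (t, tiles)
  | fuel + 1 =>
    if hole > 0 then
      let ntiles := side ^ 2 - hole ^ 2
      if ntiles ≤ n then
        laminaeInner fuel n side (t + 1) (hole - 2)
          (PySem.List.pySetD tiles (ntiles - 1) (PySem.List.pyGetD tiles (ntiles - 1) 0 + 1))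
      else (t, tiles)
    else (t, tiles)

-- outer `while side**2 - (side-2)**2 <= n` of A (fuel bounds the number of side increments)
def laminaeOuter (fuel : Nat) (n side t : Int) (tiles : List Int) : List Int :=
  match fuel with
  | 0 => tiles
  | fuel + 1 =>
    if side ^ 2 - (side - 2) ^ 2 ≤ n then
      let r := laminaeInner ((side - 2).toNat + 1) n side t (side - 2) tiles
      laminaeOuter fuel n (side + 1) r.1 r.2
    else tiles

def laminae (n : Int) : List Int :=
  -- tiles = [0 for i in range(n)]
  laminaeOuter (n.toNat + 1) n 3 0 ((PySem.List.pyRange 0 n 1).map (fun _ => (0 : Int)))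

-- ===== PORT B =====
-- inner `while p * q <= n` loop of B (fuel bounds the iteration count: q grows by 2)
def laminaeAltInner (fuel : Nat) (n p q : Int) (tiles : List Int) : List Int :=
  match fuel with
  | 0 => tiles
  | fuel + 1 =>
    if p * q ≤ n then
      laminaeAltInner fuel n p (q + 2)
        (PySem.List.pySetD tiles (p * q - 1) (PySem.List.pyGetD tiles (p * q - 1) 0 + 1))
    else tiles

-- outer `while p * (p + 2) <= n` loop of B (fuel bounds the number of p increments)
def laminaeAltOuter (fuel : Nat) (n p : Int) (tiles : List Int) : List Int :=
  match fuel with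
  | 0 => tiles
  | fuel + 1 =>
    if p * (p + 2) ≤ n then
      laminaeAltOuter fuel n (p + 2)
        (laminaeAltInner ((n - (p + 2)).toNat + 1) n p (p + 2) tiles)
    else tiles

def laminae_alt (n : Int) : List Int :=
  -- tiles = [0] * n  (empty for n ≤ 0, exactly as in Python)
  laminaeAltOuter (n.toNat + 1) n 2 (List.replicate n.toNat (0 : Int))

-- ===== PRECONDITION & SPEC =====
def Spec_laminae (n : Int) (out : List Int) : Prop := out = laminae_alt n
instance (n : Int) (out : List Int) : Decidable (Spec_laminae n out) := by unfold Spec_laminae; infer_instance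

-- ===== CLAIM (what is proved, stated in full; the proofs are below) =====
def Claim_equal_laminae : Prop := ∀ (n : Int), Dom_laminae n → Spec_laminae n (laminae n)

-- ===== LEMMAS AND PROOFS =====

-- the factor pairs B counts for a value v: p with p*q = v, p < q, both even (q = v/p)
noncomputable def Dfin (v : Int) : Finset Int :=
  (Finset.Ico 0 v).filter (fun p => 2 ≤ p ∧ 2 ∣ p ∧ p * p < v ∧ p ∣ v ∧ 2 ∣ (v / p))

lemma mem_Dfin {v p : Int} :
    p ∈ Dfin v ↔ 2 ≤ p ∧ 2 ∣ p ∧ p * p < v ∧ p ∣ v ∧ 2 ∣ (v / p) := by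
  simp only [Dfin, Finset.mem_filter, Finset.mem_Ico]
  constructor
  · rintro ⟨_, h⟩; exact h
  · rintro ⟨h1, h2, h3, h4, h5⟩
    refine ⟨⟨by omega, ?_⟩, h1, h2, h3, h4, h5⟩
    nlinarith

-- trace of A's increments: the list of ntiles values A records, in order
def incsInner (n s h : Int) : List Int :=
  if h > 0 then
    if s ^ 2 - h ^ 2 ≤ n then (s ^ 2 - h ^ 2) :: incsInner n s (h - 2) else []
  else []
termination_by h.toNat
decreasing_by omega

def incsOuter (n s : Int) : List Int :=
  if s ^ 2 - (s - 2) ^ 2 ≤ n then incsInner n s (s - 2) ++ incsOuter n (s + 1) else []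
termination_by (n + 5 - 4 * s).toNat
decreasing_by
  have h4 : s ^ 2 - (s - 2) ^ 2 = 4 * s - 4 := by ring
  omega

def applyIncs (tiles : List Int) (L : List Int) : List Int :=
  L.foldl (fun t v => PySem.List.pySetD t (v - 1) (PySem.List.pyGetD t (v - 1) 0 + 1)) tiles

lemma laminaeInner_eq (n s : Int) : ∀ (fuel : Nat) (h t : Int) (tiles : List Int),
    h.toNat < fuel →
    (laminaeInner fuel n s t h tiles).2 = applyIncs tiles (incsInner n s h) := by
  intro fuel
  induction fuel with
  | zero => intro h t tiles hf; omega
  | succ fuel ih =>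
    intro h t tiles hf
    rw [laminaeInner, incsInner]
    by_cases hpos : h > 0
    · rw [if_pos hpos, if_pos hpos]
      by_cases hle : s ^ 2 - h ^ 2 ≤ n
      · simp only [if_pos hle]
        rw [applyIncs, List.foldl_cons]
        exact ih (h - 2) _ _ (by omega)
      · simp only [if_neg hle]
        rfl
    · rw [if_neg hpos, if_neg hpos]
      rfl

lemma applyIncs_append (tiles : List Int) (L M : List Int) :
    applyIncs tiles (L ++ M) = applyIncs (applyIncs tiles L) M :=
  List.foldl_append

lemma laminaeOuter_eq (n : Int) : ∀ (fuel : Nat) (s t : Int) (tiles : List Int),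
    (n + 5 - 4 * s).toNat < fuel →
    laminaeOuter fuel n s t tiles = applyIncs tiles (incsOuter n s) := by
  intro fuel
  induction fuel with
  | zero => intro s t tiles hf; omega
  | succ fuel ih =>
    intro s t tiles hf
    rw [laminaeOuter, incsOuter]
    by_cases hle : s ^ 2 - (s - 2) ^ 2 ≤ n
    · rw [if_pos hle, if_pos hle, applyIncs_append]
      simp only
      have h4 : s ^ 2 - (s - 2) ^ 2 = 4 * s - 4 := by ring
      rw [ih (s + 1) _ _ (by omega),
          laminaeInner_eq n s ((s - 2).toNat + 1) (s - 2) t tiles (by omega)]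
    · rw [if_neg hle, if_neg hle]
      rfl

lemma applyIncs_length (L : List Int) : ∀ tiles, (applyIncs tiles L).length = tiles.length := by
  induction L with
  | nil => intro tiles; rfl
  | cons v L ih =>
    intro tiles
    rw [applyIncs, List.foldl_cons]
    rw [show ∀ M s, List.foldl (fun t v => PySem.List.pySetD t (v - 1) (PySem.List.pyGetD t (v - 1) 0 + 1)) s M = applyIncs s M from fun _ _ => rfl]
    rw [ih, PySem.List.length_pySetD]

lemma applyIncs_getD (L : List Int) : ∀ tiles, (∀ v ∈ L, 1 ≤ v ∧ v ≤ (tiles.length : Int)) →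
    ∀ (i : Nat), i < tiles.length →
      (applyIncs tiles L).getD i 0 = tiles.getD i 0 + L.count ((i : Int) + 1) := by
  induction L with
  | nil => intro tiles _ i hi; simp [applyIncs]
  | cons v L ih =>
    intro tiles hv i hi
    obtain ⟨hv1, hv2⟩ := hv v List.mem_cons_self
    have hj : (v - 1).toNat < tiles.length := by omega
    have hget : PySem.List.pyGetD tiles (v - 1) 0 = tiles[(v - 1).toNat] :=
      PySem.List.pyGetD_eq_getElem tiles 0 (by omega) (by omega)
    have hset : PySem.List.pySetD tiles (v - 1) (PySem.List.pyGetD tiles (v - 1) 0 + 1)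
        = tiles.set (v - 1).toNat (tiles[(v - 1).toNat] + 1) := by
      rw [hget, PySem.List.pySetD_of_nonneg tiles _ (by omega)]
    have hstep : applyIncs tiles (v :: L)
        = applyIncs (tiles.set (v - 1).toNat (tiles[(v - 1).toNat] + 1)) L := by
      rw [applyIncs, List.foldl_cons, hset]; rfl
    have hlen : (tiles.set (v - 1).toNat (tiles[(v - 1).toNat] + 1)).length = tiles.length := by
      simp
    have hv' : ∀ w ∈ L, 1 ≤ w ∧ w ≤ ((tiles.set (v - 1).toNat (tiles[(v - 1).toNat] + 1)).length : Int) := by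
      intro w hw; rw [hlen]; exact hv w (List.mem_cons_of_mem _ hw)
    have hrec := ih _ hv' i (by rw [hlen]; exact hi)
    have hcnt : (((v :: L).count ((i : Int) + 1) : Nat) : Int)
        = ((L.count ((i : Int) + 1) : Nat) : Int) + (if (i : Int) + 1 = v then 1 else 0) := by
      by_cases hiv : (i : Int) + 1 = v
      · simp [hiv]
      · simp [List.count_cons, beq_iff_eq, hiv]
        omega
    have hsetD : (tiles.set (v - 1).toNat (tiles[(v - 1).toNat] + 1)).getD i 0
        = tiles.getD i 0 + (if (i : Int) + 1 = v then 1 else 0) := by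
      rw [List.getD_eq_getElem?_getD, List.getElem?_set]
      by_cases hiv : (i : Int) + 1 = v
      · have hidx : (v - 1).toNat = i := by omega
        rw [if_pos hidx, if_pos hiv]
        simp [hidx, List.getD_eq_getElem?_getD, hi]
      · rw [if_neg (by omega), if_neg hiv]
        simp [List.getD_eq_getElem?_getD]
    rw [hstep, hrec, hsetD, hcnt]
    ring

lemma mem_incsInner (n s : Int) : ∀ (h v : Int),
    v ∈ incsInner n s h ↔ ∃ h', 0 < h' ∧ h' ≤ h ∧ 2 ∣ (h - h') ∧ v = s ^ 2 - h' ^ 2 ∧ v ≤ n := by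
  intro h v
  induction h using incsInner.induct n s with
  | case1 h hpos hle ih =>
    rw [incsInner, if_pos hpos, if_pos hle, List.mem_cons, ih]
    constructor
    · rintro (rfl | ⟨h', h1, h2, h3, h4, h5⟩)
      · exact ⟨h, hpos, le_rfl, by omega, rfl, hle⟩
      · exact ⟨h', h1, by omega, by omega, h4, h5⟩
    · rintro ⟨h', h1, h2, h3, h4, h5⟩
      by_cases hh : h' = h
      · subst hh; exact Or.inl h4
      · exact Or.inr ⟨h', h1, by omega, by omega, h4, h5⟩
  | case2 h hpos hle =>
    rw [incsInner, if_pos hpos, if_neg hle]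
    simp only [List.not_mem_nil, false_iff]
    rintro ⟨h', h1, h2, h3, rfl, h5⟩
    have : h' ^ 2 ≤ h ^ 2 := by nlinarith
    omega
  | case3 h hpos =>
    rw [incsInner, if_neg hpos]
    simp only [List.not_mem_nil, false_iff]
    rintro ⟨h', h1, h2, _, _, _⟩
    omega

lemma mem_incsOuter_bounds (n : Int) : ∀ (s : Int), 3 ≤ s →
    ∀ v ∈ incsOuter n s, 1 ≤ v ∧ v ≤ n := by
  intro s
  induction s using incsOuter.induct n with
  | case1 s hle ih =>
    intro hs v hv
    rw [incsOuter, if_pos hle, List.mem_append] at hv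
    rcases hv with hv | hv
    · obtain ⟨h', h1, h2, _, rfl, h5⟩ := (mem_incsInner n s (s - 2) v).mp hv
      refine ⟨?_, h5⟩
      nlinarith
    · exact ih (by omega) v hv
  | case2 s hle =>
    intro hs v hv
    rw [incsOuter, if_neg hle] at hv
    simp at hv

lemma incsInner_pairwise (n s : Int) : ∀ h : Int, (incsInner n s h).Pairwise (· < ·) := by
  intro h
  induction h using incsInner.induct n s with
  | case1 h hpos hle ih =>
    rw [incsInner, if_pos hpos, if_pos hle]
    refine List.Pairwise.cons ?_ ih
    intro w hw
    obtain ⟨h', h1, h2, _, rfl, _⟩ := (mem_incsInner n s (h - 2) w).mp hw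
    nlinarith
  | case2 h hpos hle => rw [incsInner, if_pos hpos, if_neg hle]; exact List.Pairwise.nil
  | case3 h hpos => rw [incsInner, if_neg hpos]; exact List.Pairwise.nil

lemma mem_incsInner_iff_p (n s v : Int) (hvn : v ≤ n) :
    v ∈ incsInner n s (s - 2) ↔ ∃ p ∈ Dfin v, p + v / p = 2 * s := by
  rw [mem_incsInner]
  constructor
  · rintro ⟨h', h1, h2, h3, rfl, h5⟩
    refine ⟨s - h', ?_, ?_⟩
    · rw [mem_Dfin]
      have hdvd : (s - h') ∣ (s ^ 2 - h' ^ 2) := ⟨s + h', by ring⟩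
      have hq : (s ^ 2 - h' ^ 2) / (s - h') = s + h' := by
        rw [show s ^ 2 - h' ^ 2 = (s - h') * (s + h') from by ring]
        exact Int.mul_ediv_cancel_left _ (by omega)
      refine ⟨by omega, by omega, by nlinarith, hdvd, ?_⟩
      rw [hq]; omega
    · have hq : (s ^ 2 - h' ^ 2) / (s - h') = s + h' := by
        rw [show s ^ 2 - h' ^ 2 = (s - h') * (s + h') from by ring]
        exact Int.mul_ediv_cancel_left _ (by omega)
      rw [hq]; ring
  · rintro ⟨p, hp, hsum⟩
    rw [mem_Dfin] at hp
    obtain ⟨hp2, hpe, hpp, hpd, hqe⟩ := hp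
    have hq : p * (v / p) = v := Int.mul_ediv_cancel' hpd
    have hps : p < s := by nlinarith [hq, hsum, hpp]
    refine ⟨s - p, by omega, by omega, by omega, ?_, hvn⟩
    have : v / p = 2 * s - p := by omega
    nlinarith [hq, this]

lemma Dfin_sigma_inj (v : Int) : ∀ p₁ ∈ Dfin v, ∀ p₂ ∈ Dfin v,
    p₁ + v / p₁ = p₂ + v / p₂ → p₁ = p₂ := by
  intro p₁ h1 p₂ h2 hsum
  rw [mem_Dfin] at h1 h2
  obtain ⟨a2, _, app, apd, _⟩ := h1
  obtain ⟨b2, _, bpp, bpd, _⟩ := h2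
  have ha : p₁ * (v / p₁) = v := Int.mul_ediv_cancel' apd
  have hb : p₂ * (v / p₂) = v := Int.mul_ediv_cancel' bpd
  by_contra hne
  have key : (p₁ - p₂) * (p₁ - v / p₂) = 0 := by nlinarith [ha, hb, hsum]
  have h12 : p₁ = v / p₂ := by
    rcases mul_eq_zero.mp key with h | h
    · omega
    · omega
  -- then p₂ * p₂ < v = p₂ * p₁ gives p₂ < p₁, and p₁ * p₁ < v = p₁ * p₂ gives p₁ < p₂
  have hv2 : v = p₂ * p₁ := by rw [h12]; exact hb.symm
  have hlt1 : p₂ < p₁ := by nlinarith [bpp]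
  have hlt2 : p₁ < p₂ := by nlinarith [app]
  omega

lemma incsInner_count (n s v : Int) (hvn : v ≤ n) :
    (incsInner n s (s - 2)).count v
      = ((Dfin v).filter (fun p => p + v / p = 2 * s)).card := by
  have hc1 : (incsInner n s (s - 2)).count v ≤ 1 :=
    List.nodup_iff_count_le_one.mp (((incsInner_pairwise n s (s - 2)).imp ne_of_lt)) v
  have hc2 : ((Dfin v).filter (fun p => p + v / p = 2 * s)).card ≤ 1 := by
    rw [Finset.card_le_one]
    intro a ha b hb
    rw [Finset.mem_filter] at ha hb
    exact Dfin_sigma_inj v a ha.1 b hb.1 (by rw [ha.2, hb.2])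
  have hiff : 0 < (incsInner n s (s - 2)).count v
      ↔ 0 < ((Dfin v).filter (fun p => p + v / p = 2 * s)).card := by
    rw [List.count_pos_iff, Finset.card_pos, mem_incsInner_iff_p n s v hvn]
    constructor
    · rintro ⟨p, hp, hs⟩; exact ⟨p, Finset.mem_filter.mpr ⟨hp, hs⟩⟩
    · rintro ⟨p, hp⟩
      rw [Finset.mem_filter] at hp
      exact ⟨p, hp.1, hp.2⟩
  omega

lemma incsOuter_count (n v : Int) (hv : 1 ≤ v) (hvn : v ≤ n) : ∀ s : Int,
    (incsOuter n s).count v = ((Dfin v).filter (fun p => 2 * s ≤ p + v / p)).card := by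
  intro s
  induction s using incsOuter.induct n with
  | case1 s hle ih =>
    rw [incsOuter, if_pos hle, List.count_append, incsInner_count n s v hvn, ih]
    have hsplit : (Dfin v).filter (fun p => 2 * s ≤ p + v / p)
        = ((Dfin v).filter (fun p => p + v / p = 2 * s))
          ∪ ((Dfin v).filter (fun p => 2 * (s + 1) ≤ p + v / p)) := by
      ext p
      simp only [Finset.mem_filter, Finset.mem_union]
      constructor
      · rintro ⟨hp, hps⟩
        obtain ⟨_, ⟨a, ha⟩, _, hpd, ⟨b, hb⟩⟩ := mem_Dfin.mp hp
        by_cases he : p + v / p = 2 * s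
        · exact Or.inl ⟨hp, he⟩
        · exact Or.inr ⟨hp, by omega⟩
      · rintro (⟨hp, hps⟩ | ⟨hp, hps⟩) <;> exact ⟨hp, by omega⟩
    rw [hsplit, Finset.card_union_of_disjoint]
    · rw [Finset.disjoint_filter]
      intro p _ hps
      omega
  | case2 s hle =>
    rw [incsOuter, if_neg hle]
    have hfalse : (Dfin v).filter (fun p => 2 * s ≤ p + v / p) = ∅ := by
      rw [Finset.filter_eq_empty_iff]
      intro p hp hps
      obtain ⟨hp2, _, hpp, hpd, _⟩ := mem_Dfin.mp hp
      have hq : p * (v / p) = v := Int.mul_ediv_cancel' hpd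
      have hq2 : p < v / p := by nlinarith
      have hbig : 2 * (p + v / p) - 4 ≤ v := by nlinarith [hq]
      have hn : n < s ^ 2 - (s - 2) ^ 2 := by omega
      nlinarith [hn]
    rw [hfalse]
    simp

lemma Dfin_sigma_ge (v : Int) : ∀ p ∈ Dfin v, 2 ≤ p ∧ 2 * 3 ≤ p + v / p := by
  intro p hp
  obtain ⟨hp2, hpe, hpp, hpd, hqe⟩ := mem_Dfin.mp hp
  have hq : p * (v / p) = v := Int.mul_ediv_cancel' hpd
  have hlt : p < v / p := by nlinarith
  obtain ⟨a, ha⟩ := hpe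
  obtain ⟨b, hb⟩ := hqe
  exact ⟨hp2, by omega⟩

-- trace of B's increments: the list of p*q values B records, in order (fueled like the port)
def incsBInner (fuel : Nat) (n p q : Int) : List Int :=
  match fuel with
  | 0 => []
  | fuel + 1 => if p * q ≤ n then (p * q) :: incsBInner fuel n p (q + 2) else []

def incsBOuter (fuel : Nat) (n p : Int) : List Int :=
  match fuel with
  | 0 => []
  | fuel + 1 =>
    if p * (p + 2) ≤ n then
      incsBInner ((n - (p + 2)).toNat + 1) n p (p + 2) ++ incsBOuter fuel n (p + 2)
    else []

lemma laminaeAltInner_eq (n p : Int) : ∀ (fuel : Nat) (q : Int) (tiles : List Int),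
    laminaeAltInner fuel n p q tiles = applyIncs tiles (incsBInner fuel n p q) := by
  intro fuel
  induction fuel with
  | zero => intro q tiles; rfl
  | succ fuel ih =>
    intro q tiles
    rw [laminaeAltInner, incsBInner]
    by_cases hle : p * q ≤ n
    · rw [if_pos hle, if_pos hle, applyIncs, List.foldl_cons]
      exact ih (q + 2) _
    · rw [if_neg hle, if_neg hle]
      rfl

lemma laminaeAltOuter_eq (n : Int) : ∀ (fuel : Nat) (p : Int) (tiles : List Int),
    laminaeAltOuter fuel n p tiles = applyIncs tiles (incsBOuter fuel n p) := by
  intro fuel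
  induction fuel with
  | zero => intro p tiles; rfl
  | succ fuel ih =>
    intro p tiles
    rw [laminaeAltOuter, incsBOuter]
    by_cases hle : p * (p + 2) ≤ n
    · rw [if_pos hle, if_pos hle, applyIncs_append, laminaeAltInner_eq]
      exact ih (p + 2) _
    · rw [if_neg hle, if_neg hle]
      rfl

lemma mem_incsBInner (n p : Int) (hp : 2 ≤ p) : ∀ (fuel : Nat) (q v : Int), 2 ≤ q →
    (n - q).toNat < fuel →
    (v ∈ incsBInner fuel n p q ↔ ∃ q', q ≤ q' ∧ 2 ∣ (q' - q) ∧ v = p * q' ∧ v ≤ n) := by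
  intro fuel
  induction fuel with
  | zero => intro q v hq hf; omega
  | succ fuel ih =>
    intro q v hq hf
    rw [incsBInner]
    by_cases hle : p * q ≤ n
    · have hqlt : q < p * q := by nlinarith
      rw [if_pos hle, List.mem_cons, ih (q + 2) v (by omega) (by omega)]
      constructor
      · rintro (rfl | ⟨q', h1, h2, h3, h4⟩)
        · exact ⟨q, le_rfl, by omega, rfl, hle⟩
        · exact ⟨q', by omega, by omega, h3, h4⟩
      · rintro ⟨q', h1, h2, h3, h4⟩
        by_cases hqq : q' = q
        · subst hqq; exact Or.inl h3
        · exact Or.inr ⟨q', by omega, by omega, h3, h4⟩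
    · rw [if_neg hle]
      simp only [List.not_mem_nil, false_iff]
      rintro ⟨q', h1, h2, rfl, h4⟩
      have : p * q ≤ p * q' := by nlinarith
      omega

lemma incsBInner_pairwise (n p : Int) (hp : 2 ≤ p) : ∀ (fuel : Nat) (q : Int), 2 ≤ q →
    (incsBInner fuel n p q).Pairwise (· < ·) := by
  intro fuel
  induction fuel with
  | zero => intro q hq; exact List.Pairwise.nil
  | succ fuel ih =>
    intro q hq
    rw [incsBInner]
    by_cases hle : p * q ≤ n
    · rw [if_pos hle]
      refine List.Pairwise.cons ?_ (ih (q + 2) (by omega))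
      intro w hw
      -- w = p * q' for some q' ≥ q + 2 (weak membership suffices)
      have : ∀ (f : Nat) (q0 : Int), w ∈ incsBInner f n p q0 → ∃ q', q0 ≤ q' ∧ w = p * q' := by
        intro f
        induction f with
        | zero => intro q0 h; cases h
        | succ f ihf =>
          intro q0 h
          rw [incsBInner] at h
          by_cases hle0 : p * q0 ≤ n
          · rw [if_pos hle0, List.mem_cons] at h
            rcases h with rfl | h
            · exact ⟨q0, le_rfl, rfl⟩
            · obtain ⟨q', h1, h2⟩ := ihf (q0 + 2) h
              exact ⟨q', by omega, h2⟩
          · rw [if_neg hle0] at h; cases h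
      obtain ⟨q', h1, rfl⟩ := this fuel (q + 2) hw
      nlinarith
    · rw [if_neg hle]
      exact List.Pairwise.nil

lemma incsBInner_count (n p v : Int) (hp : 2 ≤ p) (hpe : 2 ∣ p) (hvn : v ≤ n)
    (fuel : Nat) (hf : (n - (p + 2)).toNat < fuel) :
    (incsBInner fuel n p (p + 2)).count v
      = ((Dfin v).filter (fun x => x = p)).card := by
  have hmem : v ∈ incsBInner fuel n p (p + 2) ↔ p ∈ Dfin v := by
    rw [mem_incsBInner n p hp fuel (p + 2) v (by omega) hf, mem_Dfin]
    constructor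
    · rintro ⟨q', h1, h2, rfl, h4⟩
      have hq : (p * q') / p = q' := Int.mul_ediv_cancel_left _ (by omega)
      refine ⟨hp, hpe, by nlinarith, Dvd.intro _ rfl, ?_⟩
      rw [hq]
      rcases hpe with ⟨a, ha⟩
      exact ⟨a + 1 + (q' - p - 2) / 2 * 1 + ((q' - p - 2) / 2 * 0), by omega⟩
    · rintro ⟨_, _, hpp, hpd, hqe⟩
      have hq : p * (v / p) = v := Int.mul_ediv_cancel' hpd
      have hlt : p < v / p := by nlinarith
      rcases hpe with ⟨a, ha⟩
      rcases hqe with ⟨b, hb⟩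
      exact ⟨v / p, by omega, by omega, hq.symm, hvn⟩
  have hc1 : (incsBInner fuel n p (p + 2)).count v ≤ 1 :=
    List.nodup_iff_count_le_one.mp ((incsBInner_pairwise n p hp fuel (p + 2) (by omega)).imp ne_of_lt) v
  have heq : (Dfin v).filter (fun x => x = p) = if p ∈ Dfin v then {p} else ∅ :=
    Finset.filter_eq' (Dfin v) p
  by_cases hmemD : p ∈ Dfin v
  · rw [heq, if_pos hmemD, Finset.card_singleton]
    have := List.count_pos_iff.mpr (hmem.mpr hmemD)
    omega
  · rw [heq, if_neg hmemD, Finset.card_empty]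
    have : v ∉ incsBInner fuel n p (p + 2) := fun h => hmemD (hmem.mp h)
    have := List.count_eq_zero_of_not_mem this
    omega

lemma incsBInner_bounds (n p : Int) (hp : 0 < p) : ∀ (fuel : Nat) (q : Int), 0 < q →
    ∀ v ∈ incsBInner fuel n p q, 1 ≤ v ∧ v ≤ n := by
  intro fuel
  induction fuel with
  | zero => intro q hq v hv; cases hv
  | succ fuel ih =>
    intro q hq v hv
    rw [incsBInner] at hv
    by_cases hle : p * q ≤ n
    · rw [if_pos hle, List.mem_cons] at hv
      rcases hv with rfl | hv
      · exact ⟨by nlinarith, hle⟩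
      · exact ih (q + 2) (by omega) v hv
    · rw [if_neg hle] at hv; cases hv

lemma mem_incsBOuter_bounds (n : Int) : ∀ (fuel : Nat) (p : Int), 0 < p →
    ∀ v ∈ incsBOuter fuel n p, 1 ≤ v ∧ v ≤ n := by
  intro fuel
  induction fuel with
  | zero => intro p hp v hv; cases hv
  | succ fuel ih =>
    intro p hp v hv
    rw [incsBOuter] at hv
    by_cases hle : p * (p + 2) ≤ n
    · rw [if_pos hle, List.mem_append] at hv
      rcases hv with hv | hv
      · exact incsBInner_bounds n p hp _ (p + 2) (by omega) v hv
      · exact ih (p + 2) (by omega) v hv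
    · rw [if_neg hle] at hv; cases hv

lemma incsBOuter_count (n v : Int) (hvn : v ≤ n) : ∀ (fuel : Nat) (p : Int),
    2 ≤ p → 2 ∣ p → (n - p).toNat < fuel →
    (incsBOuter fuel n p).count v = ((Dfin v).filter (fun x => p ≤ x)).card := by
  intro fuel
  induction fuel with
  | zero => intro p hp hpe hf; omega
  | succ fuel ih =>
    intro p hp hpe hf
    rw [incsBOuter]
    by_cases hle : p * (p + 2) ≤ n
    · have hplt : p < p * (p + 2) := by nlinarith
      rw [if_pos hle, List.count_append,
          incsBInner_count n p v hp hpe hvn _ (by omega),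
          ih (p + 2) (by omega) (by omega) (by omega)]
      have hsplit : (Dfin v).filter (fun x => p ≤ x)
          = ((Dfin v).filter (fun x => x = p)) ∪ ((Dfin v).filter (fun x => p + 2 ≤ x)) := by
        ext x
        simp only [Finset.mem_filter, Finset.mem_union]
        constructor
        · rintro ⟨hx, hpx⟩
          have h2x := (mem_Dfin.mp hx).2.1
          rcases hpe with ⟨a, ha⟩; rcases h2x with ⟨b, hb⟩
          by_cases hxp : x = p
          · exact Or.inl ⟨hx, hxp⟩
          · exact Or.inr ⟨hx, by omega⟩
        · rintro (⟨hx, hxp⟩ | ⟨hx, hxp⟩) <;> exact ⟨hx, by omega⟩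
      rw [hsplit, Finset.card_union_of_disjoint]
      · rw [Finset.disjoint_filter]
        intro x _ hxp; omega
    · rw [if_neg hle]
      have hfalse : (Dfin v).filter (fun x => p ≤ x) = ∅ := by
        rw [Finset.filter_eq_empty_iff]
        intro x hx hpx
        obtain ⟨hx2, hxe, hxpp, hxd, hxqe⟩ := mem_Dfin.mp hx
        have hq : x * (v / x) = v := Int.mul_ediv_cancel' hxd
        have hlt : x < v / x := by nlinarith
        obtain ⟨a, ha⟩ := hxe
        obtain ⟨b, hb⟩ := hxqe
        have h0 : 0 ≤ x * (v / x - (x + 2)) := mul_nonneg (by omega) (by omega)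
        have hge : x * (x + 2) ≤ v := by nlinarith [hq, h0]
        have hmono : p * (p + 2) ≤ x * (x + 2) := by
          nlinarith [mul_nonneg (by omega : (0:Int) ≤ x - p) (by omega : (0:Int) ≤ x + p + 2)]
        omega
      rw [hfalse]
      simp

theorem laminae_eq_alt (n : Int) : laminae n = laminae_alt n := by
  rw [laminae, laminaeOuter_eq n (n.toNat + 1) 3 0 _ (by omega),
      laminae_alt, laminaeAltOuter_eq n (n.toNat + 1) 2 _]
  have hlz : ((PySem.List.pyRange 0 n 1).map (fun _ => (0 : Int))).length = n.toNat := by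
    simp [PySem.List.length_pyRange_one]
  apply List.ext_getElem
  · rw [applyIncs_length, applyIncs_length, hlz, List.length_replicate]
  · intro i h1 h2
    rw [applyIncs_length, List.length_replicate] at h2
    have hn : 0 < n := by omega
    have hbA : ∀ v ∈ incsOuter n 3,
        1 ≤ v ∧ v ≤ (((PySem.List.pyRange 0 n 1).map (fun _ => (0 : Int))).length : Int) := by
      intro v hv
      obtain ⟨hb1, hb2⟩ := mem_incsOuter_bounds n 3 (le_rfl) v hv
      exact ⟨hb1, by rw [hlz]; omega⟩
    have hbB : ∀ v ∈ incsBOuter (n.toNat + 1) n 2,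
        1 ≤ v ∧ v ≤ ((List.replicate n.toNat (0 : Int)).length : Int) := by
      intro v hv
      obtain ⟨hb1, hb2⟩ := mem_incsBOuter_bounds n (n.toNat + 1) 2 (by omega) v hv
      exact ⟨hb1, by rw [List.length_replicate]; omega⟩
    have hiA : i < ((PySem.List.pyRange 0 n 1).map (fun _ => (0 : Int))).length := by omega
    have hiB : i < (List.replicate n.toNat (0 : Int)).length := by
      rw [List.length_replicate]; omega
    rw [← List.getD_eq_getElem _ 0, ← List.getD_eq_getElem _ 0,
        applyIncs_getD _ _ hbA i hiA, applyIncs_getD _ _ hbB i hiB,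
        List.getD_eq_getElem _ 0 hiA, List.getD_eq_getElem _ 0 hiB,
        List.getElem_map, List.getElem_replicate,
        incsOuter_count n ((i : Int) + 1) (by omega) (by omega) 3,
        incsBOuter_count n ((i : Int) + 1) (by omega) (n.toNat + 1) 2 (le_rfl) ⟨1, rfl⟩ (by omega)]
    have e1 : (Dfin ((i : Int) + 1)).filter (fun p => 2 * 3 ≤ p + ((i : Int) + 1) / p)
        = Dfin ((i : Int) + 1) :=
      Finset.filter_true_of_mem (fun p hp => (Dfin_sigma_ge _ p hp).2)
    have e2 : (Dfin ((i : Int) + 1)).filter (fun x => 2 ≤ x) = Dfin ((i : Int) + 1) :=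
      Finset.filter_true_of_mem (fun p hp => (Dfin_sigma_ge _ p hp).1)
    rw [e1, e2]

-- ===== VERDICT (by name: the statement is the Claim_ definition above) =====
theorem laminae_spec : Claim_equal_laminae := by
  intro n _
  unfold Spec_laminae
  exact laminae_eq_alt n
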